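-- pv_equiv track=rewrite | github.com/haarcuba/noam_reviv_crawler | crawler.py | get_site_name
-- ===== SOURCE A (Python) =====
-- def get_site_name(url):
--     '''
--     get the name of the parent site.
--     example: https://en.wikipedia.org/wiki/Chess => https://en.wikipedia.org
--     '''
--     counter = 0
--     index = 0
--     while index < len(url):
--         if url[index] == '/':
--             counter += 1
--         if counter == 3:
--             return url[0:index]
--         index += 1
--     return url
-- ===== SOURCE B (Python) =====
-- def get_site_name(url):
--     return '/'.join(url.split('/')[:3])
-- ===== Notes on version B (the rewrite author's own statement) =====
-- stated objective: idiomatic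
-- what changed: Replaced the manual index/counter character scan (with an explicit slice on hitting the third slash) by splitting the url on the separator, taking the first three components, and rejoining them.
import Mathlib
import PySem

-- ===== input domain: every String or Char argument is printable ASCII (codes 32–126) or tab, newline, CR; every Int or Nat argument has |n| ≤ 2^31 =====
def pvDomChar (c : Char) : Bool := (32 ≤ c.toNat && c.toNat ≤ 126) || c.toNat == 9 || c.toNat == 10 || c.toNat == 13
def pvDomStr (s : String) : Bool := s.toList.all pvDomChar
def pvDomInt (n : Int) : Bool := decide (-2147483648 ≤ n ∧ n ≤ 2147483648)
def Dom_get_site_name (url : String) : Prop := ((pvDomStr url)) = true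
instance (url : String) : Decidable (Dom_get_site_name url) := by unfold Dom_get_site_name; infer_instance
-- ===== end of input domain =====

-- B replaces A's manual index/counter scan by split / take three components / rejoin (idiomatic; measured constant-factor speedup from C-level split).

-- ===== PORT A =====
-- while loop over index with a slash counter; url[0:index] on the third slash
def pvA_go (full : List Char) (counter index : Nat) : List Char :=
  if h : index < full.length then
    let counter' := if full[index] = '/' then counter + 1 else counter
    if counter' = 3 then full.take index
    else pvA_go full counter' (index + 1)
  else full
termination_by full.length - index

def get_site_name (url : String) : String := String.ofList (pvA_go url.toList 0 0)

-- ===== PORT B =====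
-- '/'.join(url.split('/')[:3]); split has the literal nonempty sep "/", so the sep ≠ "" form Chars.splitOn is exact
def get_site_name_alt (url : String) : String :=
  PySem.Str.join "/"
    (PySem.List.slice ((PySem.Chars.splitOn url.toList "/".toList).map String.ofList) none (some 3))

-- ===== PRECONDITION & SPEC =====
def Spec_get_site_name (url : String) (out : String) : Prop := out = get_site_name_alt url
instance (url : String) (out : String) : Decidable (Spec_get_site_name url out) := by unfold Spec_get_site_name; infer_instance

-- ===== CLAIM (what is proved, stated in full; the proofs are below) =====
def Claim_equal_get_site_name : Prop := ∀ (url : String), Dom_get_site_name url → Spec_get_site_name url (get_site_name url)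

-- ===== LEMMAS AND PROOFS =====

-- A's scan, restated structurally on the remaining suffix
def pvScan (cs : List Char) (c : Nat) : List Char :=
  match cs with
  | [] => []
  | x :: xs =>
      let c' := if x = '/' then c + 1 else c
      if c' = 3 then [] else x :: pvScan xs c'

-- structural form of Chars.splitOn on the single-char separator '/'
def pvSp (cs : List Char) : List (List Char) :=
  match cs with
  | [] => [[]]
  | x :: xs => if x = '/' then [] :: pvSp xs else (pvSp xs).modifyHead (x :: ·)

theorem pvSp_ne_nil (cs : List Char) : pvSp cs ≠ [] := by
  cases cs with
  | nil => simp [pvSp]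
  | cons x xs =>
    simp only [pvSp]
    split
    · simp
    · cases h : pvSp xs with
      | nil => exact absurd h (pvSp_ne_nil xs)
      | cons a l => simp [List.modifyHead]

theorem pvA_go_eq (full : List Char) (c i : Nat) :
    pvA_go full c i = full.take i ++ pvScan (full.drop i) c := by
  unfold pvA_go
  split
  · rename_i h
    rw [← List.getElem_cons_drop h]
    simp only [pvScan]
    by_cases h3 : (if full[i] = '/' then c + 1 else c) = 3
    · rw [if_pos h3, if_pos h3]
      simp
    · rw [if_neg h3, if_neg h3, pvA_go_eq full _ (i + 1),
          show List.take (i + 1) full = List.take i full ++ [full[i]] from by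
            rw [List.take_add_one, List.getElem?_eq_getElem h]; rfl,
          List.append_assoc]
      rfl
  · rename_i h
    rw [List.drop_eq_nil_of_le (by omega), List.take_of_length_le (by omega)]
    simp [pvScan]
termination_by full.length - i

theorem pvGo_eq (fuel : Nat) (l cur : List Char) (acc : List (List Char))
    (h : l.length ≤ fuel) :
    PySem.Chars.splitOn.go ['/'] fuel l cur acc
      = acc.reverse ++ (pvSp l).modifyHead (cur.reverse ++ ·) := by
  induction fuel generalizing l cur acc with
  | zero =>
    have : l = [] := List.eq_nil_of_length_eq_zero (by omega)
    subst this
    simp [PySem.Chars.splitOn.go, pvSp]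
  | succ n ih =>
    cases l with
    | nil => simp [PySem.Chars.splitOn.go, pvSp]
    | cons x xs =>
      simp only [PySem.Chars.splitOn.go]
      by_cases hx : x = '/'
      · subst hx
        rw [if_pos (by simp [List.isPrefixOf])]
        rw [show List.drop ['/'].length ('/' :: xs) = xs from rfl]
        rw [ih xs [] (cur.reverse :: acc) (by simpa using h)]
        simp [pvSp]
        cases hsp : pvSp xs with
        | nil => exact absurd hsp (pvSp_ne_nil xs)
        | cons a l => simp [List.modifyHead]
      · rw [if_neg (by simp [List.isPrefixOf]; exact fun hh => hx hh.symm)]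
        rw [ih xs (x :: cur) acc (by simpa using h)]
        simp only [pvSp, if_neg hx]
        congr 1
        cases hsp : pvSp xs with
        | nil => exact absurd hsp (pvSp_ne_nil xs)
        | cons a l => simp [List.modifyHead]

theorem splitOn_eq_pvSp (cs : List Char) :
    PySem.Chars.splitOn cs ['/'] = pvSp cs := by
  unfold PySem.Chars.splitOn
  rw [pvGo_eq cs.length.succ cs [] [] (by omega)]
  cases hsp : pvSp cs with
  | nil => exact absurd hsp (pvSp_ne_nil cs)
  | cons a l => simp [List.modifyHead]

theorem take_modifyHead {α : Type} (f : α → α) (xs : List α) (k : Nat) :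
    (xs.modifyHead f).take (k + 1) = (xs.take (k + 1)).modifyHead f := by
  cases xs <;> simp [List.modifyHead]

theorem join_modifyHead_cons (sep : List Char) (c : Char) (xs : List (List Char))
    (h : xs ≠ []) :
    PySem.Chars.join sep (xs.modifyHead (c :: ·)) = c :: PySem.Chars.join sep xs := by
  cases xs with
  | nil => exact absurd rfl h
  | cons a l =>
    cases l with
    | nil => simp [List.modifyHead, PySem.Chars.join_singleton]
    | cons b m =>
      simp only [List.modifyHead, PySem.Chars.join_cons_cons]
      simp

theorem pvScan_eq_join (cs : List Char) (k : Nat) (h1 : 1 ≤ k) (h2 : k ≤ 3) :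
    pvScan cs (3 - k) = PySem.Chars.join ['/'] ((pvSp cs).take k) := by
  induction cs generalizing k with
  | nil =>
    obtain ⟨m, rfl⟩ : ∃ m, k = m + 1 := ⟨k - 1, by omega⟩
    simp [pvScan, pvSp, PySem.Chars.join_singleton]
  | cons x xs ih =>
    by_cases hx : x = '/'
    · rw [show pvScan (x :: xs) (3 - k) = (if 3 - k + 1 = 3 then [] else x :: pvScan xs (3 - k + 1)) from by
            simp [pvScan, hx],
          show pvSp (x :: xs) = [] :: pvSp xs from by simp [pvSp, hx]]
      subst hx
      by_cases hk : k = 1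
      · subst hk
        simp [PySem.Chars.join_singleton]
      · have hne : 3 - k + 1 ≠ 3 := by omega
        rw [if_neg hne]
        have : 3 - k + 1 = 3 - (k - 1) := by omega
        rw [this, ih (k - 1) (by omega) (by omega)]
        obtain ⟨m, rfl⟩ : ∃ m, k = m + 1 := ⟨k - 1, by omega⟩
        rw [List.take_succ_cons]
        cases htk : (pvSp xs).take m with
        | nil =>
          have : m = 0 ∨ pvSp xs = [] := by
            rcases Nat.eq_zero_or_pos m with h | h
            · exact Or.inl h
            · cases hsp : pvSp xs with
              | nil => exact Or.inr rfl
              | cons a l => rw [hsp] at htk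
                            simp at htk
                            omega
          rcases this with h | h
          · omega
          · exact absurd h (pvSp_ne_nil xs)
        | cons a l =>
          simp only [Nat.add_sub_cancel]
          rw [htk, PySem.Chars.join_cons_cons]
          simp
    · simp only [pvScan, pvSp, if_neg hx]
      have hne : 3 - k ≠ 3 := by omega
      rw [if_neg hne, ih k h1 h2]
      obtain ⟨m, rfl⟩ : ∃ m, k = m + 1 := ⟨k - 1, by omega⟩
      rw [take_modifyHead, join_modifyHead_cons]
      intro hcon
      have : pvSp xs = [] := by
        cases hsp : pvSp xs with
        | nil => rfl
        | cons a l => rw [hsp] at hcon; simp at hcon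
      exact absurd this (pvSp_ne_nil xs)

theorem toList_slash : ("/" : String).toList = ['/'] := by decide

-- ===== VERDICT (by name: the statement is the Claim_ definition above) =====
theorem get_site_name_spec : Claim_equal_get_site_name := by
  intro url _
  unfold Spec_get_site_name get_site_name get_site_name_alt
  apply String.toList_inj.mp
  rw [String.toList_ofList, PySem.List.slice_to _ (by norm_num), PySem.Str.toList_join]
  rw [pvA_go_eq url.toList 0 0]
  simp only [List.take_zero, List.drop_zero, List.nil_append]
  rw [show (0 : Nat) = 3 - 3 from rfl, pvScan_eq_join url.toList 3 (by omega) (by omega)]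
  rw [toList_slash, ← List.map_take, splitOn_eq_pvSp]
  simp [Function.comp_def]
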